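-- pv_equiv track=rewrite | github.com/bmendonca3/k8s-auto-fix | scripts/run_kyverno_webhook_baseline.py | upgrade_api_versions
-- ===== SOURCE A (Python) =====
-- def upgrade_api_versions(manifest_yaml: str) -> str:
--     """Upgrade deprecated apiVersions to help admission succeed."""
--     migrations = {
--         "apiVersion: batch/v1beta1": "apiVersion: batch/v1",
--         "apiVersion: extensions/v1beta1": "apiVersion: apps/v1",
--         "apiVersion: apps/v1beta1": "apiVersion: apps/v1",
--         "apiVersion: apps/v1beta2": "apiVersion: apps/v1",
--     }
--     for old, new in migrations.items():
--         manifest_yaml = manifest_yaml.replace(old, new)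
--     return manifest_yaml
-- ===== SOURCE B (Python) =====
-- import re
--
-- _MIGRATIONS = {
--     "apiVersion: batch/v1beta1": "apiVersion: batch/v1",
--     "apiVersion: extensions/v1beta1": "apiVersion: apps/v1",
--     "apiVersion: apps/v1beta1": "apiVersion: apps/v1",
--     "apiVersion: apps/v1beta2": "apiVersion: apps/v1",
-- }
--
-- _PATTERN = re.compile("|".join(re.escape(k) for k in _MIGRATIONS))
--
--
-- def upgrade_api_versions(manifest_yaml: str) -> str:
--     """Upgrade deprecated apiVersions in a single left-to-right pass."""
--     return _PATTERN.sub(lambda m: _MIGRATIONS[m.group(0)], manifest_yaml)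
-- ===== Notes on version B (the rewrite author's own statement) =====
-- stated objective: idiomatic
-- what changed: Replaced four sequential full-text str.replace passes by one precompiled regex alternation that scans the text once and substitutes each matched deprecated apiVersion via a dict lookup.
-- intended difference: On inputs containing one of 'apiVersion: extensions/v1beta1beta1', 'apiVersion: extensions/v1beta1beta2' or 'apiVersion: apps/v1beta1beta2', A's later replace passes re-match text produced by an earlier replacement and collapse it further (A('apiVersion: extensions/v1beta1beta1') = 'apiVersion: apps/v1'), while B replaces each deprecated string exactly once (B returns 'apiVersion: apps/v1beta1' there), which is the intended one-shot migration. — e.g. on upgrade_api_versions("apiVersion: extensions/v1beta1beta1"): A returns "apiVersion: apps/v1", B returns "apiVersion: apps/v1beta1"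
import Mathlib
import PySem

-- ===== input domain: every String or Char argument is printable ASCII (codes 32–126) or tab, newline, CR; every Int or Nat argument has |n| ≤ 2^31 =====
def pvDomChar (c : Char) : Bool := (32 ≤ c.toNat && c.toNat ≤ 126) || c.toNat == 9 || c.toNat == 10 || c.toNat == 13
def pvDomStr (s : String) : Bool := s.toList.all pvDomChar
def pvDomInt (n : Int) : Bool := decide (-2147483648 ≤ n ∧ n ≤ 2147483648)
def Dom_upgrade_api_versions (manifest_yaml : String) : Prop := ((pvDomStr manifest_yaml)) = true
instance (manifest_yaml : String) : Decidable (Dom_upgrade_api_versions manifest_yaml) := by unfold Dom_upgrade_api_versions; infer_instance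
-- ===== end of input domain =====

-- B replaces A's four sequential full-text str.replace passes by one precompiled regex
-- alternation doing a single left-to-right scan; on the cascade inputs described at D_
-- below A's later passes re-match text produced by an earlier replacement and B
-- intentionally does not.

-- ===== PORT A =====
def upgrade_api_versions (manifest_yaml : String) : String :=
  -- the literal dict of migrations, in insertion order
  let migrations : PySem.Dict String String :=
    ((((PySem.Dict.empty.insert "apiVersion: batch/v1beta1" "apiVersion: batch/v1").insert
        "apiVersion: extensions/v1beta1" "apiVersion: apps/v1").insert
        "apiVersion: apps/v1beta1" "apiVersion: apps/v1").insert
        "apiVersion: apps/v1beta2" "apiVersion: apps/v1")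
  -- for old, new in migrations.items(): manifest_yaml = manifest_yaml.replace(old, new)
  migrations.items.foldl (fun acc p => PySem.Str.replace acc p.1 p.2) manifest_yaml

-- ===== PORT B =====
-- B-side helpers: Source B compiles the pattern "k1|k2|k3|k4" from the keys of _MIGRATIONS
-- (re.escape'd literals) and applies _PATTERN.sub, i.e. one left-to-right scan that at each
-- position tries the four keys in dict order, emits the migrated value on a match and
-- resumes after the matched key, otherwise copies one character.  This hand port is exact
-- for that pattern: the alternatives are plain literals, none a prefix of another, so
-- Python's leftmost-alternation matching is exactly this if-chain; the fuel argument
-- (called with the string length) only makes the recursion structural.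
def pvK1 : List Char := "apiVersion: batch/v1beta1".toList      -- length 25
def pvV1 : List Char := "apiVersion: batch/v1".toList
def pvK2 : List Char := "apiVersion: extensions/v1beta1".toList -- length 30
def pvK3 : List Char := "apiVersion: apps/v1beta1".toList       -- length 24
def pvK4 : List Char := "apiVersion: apps/v1beta2".toList       -- length 24
def pvV : List Char := "apiVersion: apps/v1".toList             -- value of k2, k3, k4

def pvScan : Nat → List Char → List Char
  | _, [] => []
  | 0, _ :: _ => []   -- unreachable: fuel starts at the length and dominates it throughout
  | fuel + 1, c :: t =>
    if pvK1.isPrefixOf (c :: t) then pvV1 ++ pvScan fuel (List.drop 24 t)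
    else if pvK2.isPrefixOf (c :: t) then pvV ++ pvScan fuel (List.drop 29 t)
    else if pvK3.isPrefixOf (c :: t) then pvV ++ pvScan fuel (List.drop 23 t)
    else if pvK4.isPrefixOf (c :: t) then pvV ++ pvScan fuel (List.drop 23 t)
    else c :: pvScan fuel t

def upgrade_api_versions_alt (manifest_yaml : String) : String :=
  String.ofList (pvScan manifest_yaml.toList.length manifest_yaml.toList)

-- ===== PRECONDITION & SPEC =====
-- On inputs containing "apiVersion: extensions/v1beta1" immediately followed by "beta1" or
-- "beta2", or "apiVersion: apps/v1beta1" immediately followed by "beta2", A's later replace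
-- passes re-match text produced by an earlier replacement and collapse it (A turns
-- "apiVersion: extensions/v1beta1beta1" into "apiVersion: apps/v1"); B replaces each
-- deprecated string exactly once ("apiVersion: apps/v1beta1"), the intended one-shot migration.
def D_upgrade_api_versions (manifest_yaml : String) : Prop :=
  PySem.Str.isIn "apiVersion: extensions/v1beta1beta1" manifest_yaml = true ∨
  PySem.Str.isIn "apiVersion: extensions/v1beta1beta2" manifest_yaml = true ∨
  PySem.Str.isIn "apiVersion: apps/v1beta1beta2" manifest_yaml = true
instance (manifest_yaml : String) : Decidable (D_upgrade_api_versions manifest_yaml) := by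
  unfold D_upgrade_api_versions; infer_instance

def Spec_upgrade_api_versions (manifest_yaml : String) (out : String) : Prop :=
  ¬ D_upgrade_api_versions manifest_yaml → out = upgrade_api_versions_alt manifest_yaml
instance (manifest_yaml : String) (out : String) : Decidable (Spec_upgrade_api_versions manifest_yaml out) := by
  unfold Spec_upgrade_api_versions; infer_instance

def pvDiffWitness_upgrade_api_versions : String := "apiVersion: extensions/v1beta1beta1"
def pvDiffWitnessOut_upgrade_api_versions : String × String :=
  ("apiVersion: apps/v1", "apiVersion: apps/v1beta1")

-- ===== CLAIM (what is proved, stated in full; the proofs are below) =====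
def Claim_unchanged_upgrade_api_versions : Prop := ∀ (manifest_yaml : String), Dom_upgrade_api_versions manifest_yaml → Spec_upgrade_api_versions manifest_yaml (upgrade_api_versions manifest_yaml)
def Claim_exact_upgrade_api_versions : Prop := ∀ (manifest_yaml : String), Dom_upgrade_api_versions manifest_yaml → D_upgrade_api_versions manifest_yaml → upgrade_api_versions manifest_yaml ≠ upgrade_api_versions_alt manifest_yaml
def Claim_changed_upgrade_api_versions : Prop := Dom_upgrade_api_versions (pvDiffWitness_upgrade_api_versions) ∧ D_upgrade_api_versions (pvDiffWitness_upgrade_api_versions) ∧ upgrade_api_versions (pvDiffWitness_upgrade_api_versions) = pvDiffWitnessOut_upgrade_api_versions.1 ∧ upgrade_api_versions_alt (pvDiffWitness_upgrade_api_versions) = pvDiffWitnessOut_upgrade_api_versions.2 ∧ pvDiffWitnessOut_upgrade_api_versions.1 ≠ pvDiffWitnessOut_upgrade_api_versions.2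

-- ===== LEMMAS AND PROOFS =====

-- pvRep: the natural fuel-free recursion computed by one str.replace pass (old ≠ "").
def pvRep (old new : List Char) : List Char → List Char
  | [] => []
  | c :: t =>
    if old.isPrefixOf (c :: t) && !old.isEmpty then
      new ++ pvRep old new (List.drop (old.length - 1) t)
    else c :: pvRep old new t
  termination_by l => l.length
  decreasing_by all_goals (simp; try omega)

-- pvRep equations
theorem pvRep_nil (old new : List Char) : pvRep old new [] = [] := by simp [pvRep]

theorem pvRep_cons (old new : List Char) (c : Char) (t : List Char) :
    pvRep old new (c :: t) =
      if old.isPrefixOf (c :: t) && !old.isEmpty then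
        new ++ pvRep old new (List.drop (old.length - 1) t)
      else c :: pvRep old new t := by
  rw [pvRep]

theorem pvRep_head (old new x : List Char) (h : old ≠ []) :
    pvRep old new (old ++ x) = new ++ pvRep old new x := by
  obtain ⟨o, old', rfl⟩ := List.exists_cons_of_ne_nil h
  rw [List.cons_append, pvRep_cons]
  have hpre : (o :: old').isPrefixOf (o :: (old' ++ x)) = true := by
    rw [List.isPrefixOf_iff_prefix]
    exact ⟨x, by simp⟩
  simp [hpre]

theorem pvRep_nomatch (old new : List Char) (c : Char) (t : List Char)
    (h : ¬ old <+: (c :: t)) : pvRep old new (c :: t) = c :: pvRep old new t := by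
  rw [pvRep_cons]
  have hpre : old.isPrefixOf (c :: t) = false := by
    rw [Bool.eq_false_iff]
    intro hp
    exact h (List.isPrefixOf_iff_prefix.mp hp)
  simp [hpre]

-- Chars.replace agrees with pvRep for nonempty old
theorem go_eq_pvRep (old new : List Char) (h : old ≠ []) :
    ∀ (fuel : Nat) (l acc : List Char), l.length ≤ fuel →
      PySem.Chars.replace.go old new fuel l acc = acc.reverse ++ pvRep old new l := by
  intro fuel
  induction fuel with
  | zero =>
    intro l acc hl
    have : l = [] := List.length_eq_zero_iff.mp (Nat.le_zero.mp hl)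
    subst this
    simp [PySem.Chars.replace.go, pvRep_nil]
  | succ fuel ih =>
    intro l acc hl
    cases l with
    | nil => simp [PySem.Chars.replace.go, pvRep_nil]
    | cons c t =>
      obtain ⟨o, old', rfl⟩ := List.exists_cons_of_ne_nil h
      rw [PySem.Chars.replace.go]
      by_cases hp : (o :: old').isPrefixOf (c :: t) = true
      · rw [if_pos hp]
        have hlen : (List.drop (o :: old').length (c :: t)).length ≤ fuel := by
          simp only [List.length_drop, List.length_cons] at *
          omega
        rw [ih _ _ hlen, pvRep_cons]
        have hcond : ((o :: old').isPrefixOf (c :: t) && !(o :: old').isEmpty) = true := by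
          simp [hp]
        rw [if_pos hcond]
        simp [List.drop_succ_cons]
      · rw [if_neg hp]
        have hlen : t.length ≤ fuel := by
          simp only [List.length_cons] at hl; omega
        rw [ih _ _ hlen, pvRep_cons]
        have hpf : (o :: old').isPrefixOf (c :: t) = false := Bool.eq_false_iff.mpr hp
        simp [hpf]

theorem replace_eq_pvRep (old new : List Char) (h : old ≠ []) (l : List Char) :
    PySem.Chars.replace l old new = pvRep old new l := by
  have hne : old.isEmpty = false := by
    cases old with
    | nil => exact absurd rfl h
    | cons a b => rfl
  rw [PySem.Chars.replace, hne]
  simpa using go_eq_pvRep old new h l.length l [] (le_refl _)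

-- a prefix of an append splits
theorem prefix_append_cases {k b x : List Char} (h : k <+: b ++ x) : k <+: b ∨ b <+: k := by
  exact List.prefix_or_prefix_of_prefix h (List.prefix_append b x)

theorem prefix_drop_of_prefix {k b x : List Char} (hb : b <+: k) (h : k <+: b ++ x) :
    List.drop b.length k <+: x := by
  obtain ⟨k', rfl⟩ := hb
  simpa using (List.prefix_append_right_inj b).mp h

-- pass-through: a replace pass copies a block a verbatim if old can match nowhere in it
theorem pvRep_thru (old new : List Char) :
    ∀ (a x : List Char), (∀ j, j < a.length → ¬ old <+: (List.drop j a ++ x)) →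
      pvRep old new (a ++ x) = a ++ pvRep old new x := by
  intro a
  induction a with
  | nil => intro x _; simp
  | cons c a' ih =>
    intro x h
    rw [List.cons_append, pvRep_nomatch]
    · rw [ih x (fun j hj => by simpa using h (j + 1) (by simpa using hj))]; simp
    · have := h 0 (by simp)
      simpa using this

theorem pvRep_thru_incompat (old new a : List Char)
    (h : ∀ j, j < a.length → ¬ (List.drop j a <+: old) ∧ ¬ (old <+: List.drop j a))
    (x : List Char) : pvRep old new (a ++ x) = a ++ pvRep old new x := by
  apply pvRep_thru
  intro j hj hp
  rcases prefix_append_cases hp with h1 | h1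
  · exact (h j hj).2 h1
  · exact (h j hj).1 h1

theorem pvRep_thru_boundary (old new a : List Char) (ha : a <+: old)
    (h : ∀ j, 1 ≤ j → j < a.length → ¬ (List.drop j a <+: old) ∧ ¬ (old <+: List.drop j a))
    (x : List Char) (hx : ¬ (List.drop a.length old <+: x)) :
    pvRep old new (a ++ x) = a ++ pvRep old new x := by
  apply pvRep_thru
  intro j hj hp
  rcases Nat.eq_zero_or_pos j with hj0 | hj1
  · subst hj0
    exact hx (prefix_drop_of_prefix ha (by simpa using hp))
  · rcases prefix_append_cases hp with h1 | h1
    · exact (h j hj1 hj).2 h1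
    · exact (h j hj1 hj).1 h1

-- backward preservation: a prefix w0.drop j (j ≥ m) of the output of a replace pass whose
-- value is incompatible with every such suffix of w0 was already a prefix of the input
theorem pvRep_back (old new w0 : List Char) (m : Nat)
    (h : ∀ j, m ≤ j → j < w0.length → ¬ (List.drop j w0 <+: new) ∧ ¬ (new <+: List.drop j w0)) :
    ∀ (t : List Char) (j : Nat), m ≤ j → List.drop j w0 <+: pvRep old new t →
      List.drop j w0 <+: t := by
  intro t
  induction t with
  | nil =>
    intro j _ hp
    rw [pvRep_nil] at hp
    rw [List.prefix_nil.mp hp]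
  | cons c t' ih =>
    intro j hj hp
    rw [pvRep_cons] at hp
    by_cases hw : List.drop j w0 = []
    · rw [hw]; exact List.nil_prefix
    have hlt : j < w0.length := by
      by_contra hge
      exact hw (List.drop_eq_nil_of_le (by omega))
    split at hp
    · rcases prefix_append_cases hp with h1 | h1
      · exact absurd h1 (h j hj hlt).1
      · exact absurd h1 (h j hj hlt).2
    · obtain ⟨d, w', hd⟩ := List.exists_cons_of_ne_nil hw
      rw [hd] at hp
      obtain ⟨hdc, hw'⟩ := List.cons_prefix_cons.mp hp
      have hw1 : w' = List.drop (j + 1) w0 := by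
        have := congrArg (List.drop 1) hd
        simpa [List.drop_drop, Nat.add_comm] using this.symm
      rw [hd, hdc]
      exact List.cons_prefix_cons.mpr ⟨rfl, by
        rw [hw1] at hw' ⊢
        exact ih (j + 1) (by omega) hw'⟩

-- one pass cannot create a key prefix after an uncopied head character
theorem pvCons_back (old new w0 : List Char)
    (h : ∀ j, 1 ≤ j → j < w0.length → ¬ (List.drop j w0 <+: new) ∧ ¬ (new <+: List.drop j w0))
    (c : Char) (t : List Char) (hp : w0 <+: c :: pvRep old new t) : w0 <+: c :: t := by
  cases w0 with
  | nil => exact List.nil_prefix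
  | cons d w' =>
    obtain ⟨hdc, hw'⟩ := List.cons_prefix_cons.mp hp
    have h1 : List.drop 1 (d :: w') <+: pvRep old new t := by simpa using hw'
    have := pvRep_back old new (d :: w') 1 h t 1 (le_refl _) h1
    exact List.cons_prefix_cons.mpr ⟨hdc, by simpa using this⟩

-- the bad (cascade) region on char lists
def pvBad (l : List Char) : Prop :=
  (pvK2 ++ "beta1".toList) <:+: l ∨ (pvK2 ++ "beta2".toList) <:+: l ∨ (pvK3 ++ "beta2".toList) <:+: l

-- the four sequential passes of A
def pvSeq (l : List Char) : List Char :=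
  pvRep pvK4 pvV (pvRep pvK3 pvV (pvRep pvK2 pvV (pvRep pvK1 pvV1 l)))

theorem pvBad_of_infix {l' l : List Char} (h : l' <:+: l) (hb : pvBad l') : pvBad l := by
  rcases hb with h1 | h1 | h1
  · exact Or.inl (h1.trans h)
  · exact Or.inr (Or.inl (h1.trans h))
  · exact Or.inr (Or.inr (h1.trans h))

theorem pvMain : ∀ (fuel : Nat) (l : List Char), l.length ≤ fuel → ¬ pvBad l →
    pvSeq l = pvScan fuel l := by
  intro fuel
  induction fuel with
  | zero =>
    intro l hl _
    have : l = [] := List.length_eq_zero_iff.mp (Nat.le_zero.mp hl)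
    subst this
    simp [pvSeq, pvRep_nil, pvScan]
  | succ fuel ih =>
    intro l hl hbad
    cases l with
    | nil => simp [pvSeq, pvRep_nil, pvScan]
    | cons c t =>
      by_cases h1 : pvK1 <+: (c :: t)
      · obtain ⟨t1, ht1⟩ := h1
        have hlen : t1.length ≤ fuel := by
          have := congrArg List.length ht1
          simp only [List.length_append, List.length_cons] at this hl
          have h25 : pvK1.length = 25 := by decide
          omega
        have hsuf : t1 <:+: (c :: t) := List.IsSuffix.isInfix ⟨pvK1, ht1⟩
        have hbad1 : ¬ pvBad t1 := fun hb => hbad (pvBad_of_infix hsuf hb)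
        have hseq : pvSeq (c :: t) = pvV1 ++ pvSeq t1 := by
          rw [← ht1]
          unfold pvSeq
          rw [pvRep_head pvK1 pvV1 t1 (by decide),
              pvRep_thru_incompat pvK2 pvV pvV1 (by decide),
              pvRep_thru_incompat pvK3 pvV pvV1 (by decide),
              pvRep_thru_incompat pvK4 pvV pvV1 (by decide)]
        have hpf : pvK1.isPrefixOf (c :: t) = true :=
          List.isPrefixOf_iff_prefix.mpr ⟨t1, ht1⟩
        have hdrop : List.drop 24 t = t1 := by
          have h25 : List.drop 25 (c :: t) = t1 := by
            rw [← ht1]; exact List.drop_left' (by decide)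
          simpa using h25
        have hscan : pvScan (fuel + 1) (c :: t) = pvV1 ++ pvScan fuel (List.drop 24 t) := by
          rw [pvScan, if_pos hpf]
        rw [hseq, hscan, hdrop, ih t1 hlen hbad1]
      · by_cases h2 : pvK2 <+: (c :: t)
        · obtain ⟨t2, ht2⟩ := h2
          have hlen : t2.length ≤ fuel := by
            have := congrArg List.length ht2
            simp only [List.length_append, List.length_cons] at this hl
            have h30 : pvK2.length = 30 := by decide
            omega
          have hsuf : t2 <:+: (c :: t) := List.IsSuffix.isInfix ⟨pvK2, ht2⟩
          have hbad2 : ¬ pvBad t2 := fun hb => hbad (pvBad_of_infix hsuf hb)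
          have hβ1 : ¬ ("beta1".toList <+: pvRep pvK2 pvV (pvRep pvK1 pvV1 t2)) := by
            intro hp
            have h5 := pvRep_back pvK2 pvV "beta1".toList 0 (by decide)
              (pvRep pvK1 pvV1 t2) 0 (Nat.zero_le _) (by simpa using hp)
            have h6 := pvRep_back pvK1 pvV1 "beta1".toList 0 (by decide)
              t2 0 (Nat.zero_le _) (by simpa using h5)
            have h7 : "beta1".toList <+: t2 := by simpa using h6
            obtain ⟨u, hu⟩ := h7
            exact hbad (Or.inl ⟨[], u, by simp [← ht2, ← hu]⟩)
          have hβ2 : ¬ ("beta2".toList <+: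
              pvRep pvK3 pvV (pvRep pvK2 pvV (pvRep pvK1 pvV1 t2))) := by
            intro hp
            have h4 := pvRep_back pvK3 pvV "beta2".toList 0 (by decide)
              (pvRep pvK2 pvV (pvRep pvK1 pvV1 t2)) 0 (Nat.zero_le _) (by simpa using hp)
            have h5 := pvRep_back pvK2 pvV "beta2".toList 0 (by decide)
              (pvRep pvK1 pvV1 t2) 0 (Nat.zero_le _) (by simpa using h4)
            have h6 := pvRep_back pvK1 pvV1 "beta2".toList 0 (by decide)
              t2 0 (Nat.zero_le _) (by simpa using h5)
            have h7 : "beta2".toList <+: t2 := by simpa using h6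
            obtain ⟨u, hu⟩ := h7
            exact hbad (Or.inr (Or.inl ⟨[], u, by simp [← ht2, ← hu]⟩))
          have hseq : pvSeq (c :: t) = pvV ++ pvSeq t2 := by
            rw [← ht2]
            unfold pvSeq
            rw [pvRep_thru_incompat pvK1 pvV1 pvK2 (by decide),
                pvRep_head pvK2 pvV _ (by decide),
                pvRep_thru_boundary pvK3 pvV pvV (by decide) (by decide) _
                  (by rw [show List.drop pvV.length pvK3 = "beta1".toList from by decide]
                      exact hβ1),
                pvRep_thru_boundary pvK4 pvV pvV (by decide) (by decide) _
                  (by rw [show List.drop pvV.length pvK4 = "beta2".toList from by decide]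
                      exact hβ2)]
          have hpf1 : pvK1.isPrefixOf (c :: t) = false := by
            rw [Bool.eq_false_iff]
            exact fun hp => h1 (List.isPrefixOf_iff_prefix.mp hp)
          have hpf2 : pvK2.isPrefixOf (c :: t) = true :=
            List.isPrefixOf_iff_prefix.mpr ⟨t2, ht2⟩
          have hdrop : List.drop 29 t = t2 := by
            have h30 : List.drop 30 (c :: t) = t2 := by
              rw [← ht2]; exact List.drop_left' (by decide)
            simpa using h30
          have hscan : pvScan (fuel + 1) (c :: t) = pvV ++ pvScan fuel (List.drop 29 t) := by
            rw [pvScan, if_neg (by simp [hpf1]), if_pos hpf2]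
          rw [hseq, hscan, hdrop, ih t2 hlen hbad2]
        · by_cases h3 : pvK3 <+: (c :: t)
          · obtain ⟨t3, ht3⟩ := h3
            have hlen : t3.length ≤ fuel := by
              have := congrArg List.length ht3
              simp only [List.length_append, List.length_cons] at this hl
              have h24 : pvK3.length = 24 := by decide
              omega
            have hsuf : t3 <:+: (c :: t) := List.IsSuffix.isInfix ⟨pvK3, ht3⟩
            have hbad3 : ¬ pvBad t3 := fun hb => hbad (pvBad_of_infix hsuf hb)
            have hβ2 : ¬ ("beta2".toList <+:
                pvRep pvK3 pvV (pvRep pvK2 pvV (pvRep pvK1 pvV1 t3))) := by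
              intro hp
              have h4 := pvRep_back pvK3 pvV "beta2".toList 0 (by decide)
                (pvRep pvK2 pvV (pvRep pvK1 pvV1 t3)) 0 (Nat.zero_le _) (by simpa using hp)
              have h5 := pvRep_back pvK2 pvV "beta2".toList 0 (by decide)
                (pvRep pvK1 pvV1 t3) 0 (Nat.zero_le _) (by simpa using h4)
              have h6 := pvRep_back pvK1 pvV1 "beta2".toList 0 (by decide)
                t3 0 (Nat.zero_le _) (by simpa using h5)
              have h7 : "beta2".toList <+: t3 := by simpa using h6
              obtain ⟨u, hu⟩ := h7
              exact hbad (Or.inr (Or.inr ⟨[], u, by simp [← ht3, ← hu]⟩))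
            have hseq : pvSeq (c :: t) = pvV ++ pvSeq t3 := by
              rw [← ht3]
              unfold pvSeq
              rw [pvRep_thru_incompat pvK1 pvV1 pvK3 (by decide),
                  pvRep_thru_incompat pvK2 pvV pvK3 (by decide),
                  pvRep_head pvK3 pvV _ (by decide),
                  pvRep_thru_boundary pvK4 pvV pvV (by decide) (by decide) _
                    (by rw [show List.drop pvV.length pvK4 = "beta2".toList from by decide]
                        exact hβ2)]
            have hpf1 : pvK1.isPrefixOf (c :: t) = false := by
              rw [Bool.eq_false_iff]
              exact fun hp => h1 (List.isPrefixOf_iff_prefix.mp hp)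
            have hpf2 : pvK2.isPrefixOf (c :: t) = false := by
              rw [Bool.eq_false_iff]
              exact fun hp => h2 (List.isPrefixOf_iff_prefix.mp hp)
            have hpf3 : pvK3.isPrefixOf (c :: t) = true :=
              List.isPrefixOf_iff_prefix.mpr ⟨t3, ht3⟩
            have hdrop : List.drop 23 t = t3 := by
              have h24 : List.drop 24 (c :: t) = t3 := by
                rw [← ht3]; exact List.drop_left' (by decide)
              simpa using h24
            have hscan : pvScan (fuel + 1) (c :: t) = pvV ++ pvScan fuel (List.drop 23 t) := by
              rw [pvScan, if_neg (by simp [hpf1]), if_neg (by simp [hpf2]), if_pos hpf3]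
            rw [hseq, hscan, hdrop, ih t3 hlen hbad3]
          · by_cases h4 : pvK4 <+: (c :: t)
            · obtain ⟨t4, ht4⟩ := h4
              have hlen : t4.length ≤ fuel := by
                have := congrArg List.length ht4
                simp only [List.length_append, List.length_cons] at this hl
                have h24 : pvK4.length = 24 := by decide
                omega
              have hsuf : t4 <:+: (c :: t) := List.IsSuffix.isInfix ⟨pvK4, ht4⟩
              have hbad4 : ¬ pvBad t4 := fun hb => hbad (pvBad_of_infix hsuf hb)
              have hseq : pvSeq (c :: t) = pvV ++ pvSeq t4 := by
                rw [← ht4]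
                unfold pvSeq
                rw [pvRep_thru_incompat pvK1 pvV1 pvK4 (by decide),
                    pvRep_thru_incompat pvK2 pvV pvK4 (by decide),
                    pvRep_thru_incompat pvK3 pvV pvK4 (by decide),
                    pvRep_head pvK4 pvV _ (by decide)]
              have hpf1 : pvK1.isPrefixOf (c :: t) = false := by
                rw [Bool.eq_false_iff]
                exact fun hp => h1 (List.isPrefixOf_iff_prefix.mp hp)
              have hpf2 : pvK2.isPrefixOf (c :: t) = false := by
                rw [Bool.eq_false_iff]
                exact fun hp => h2 (List.isPrefixOf_iff_prefix.mp hp)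
              have hpf3 : pvK3.isPrefixOf (c :: t) = false := by
                rw [Bool.eq_false_iff]
                exact fun hp => h3 (List.isPrefixOf_iff_prefix.mp hp)
              have hpf4 : pvK4.isPrefixOf (c :: t) = true :=
                List.isPrefixOf_iff_prefix.mpr ⟨t4, ht4⟩
              have hdrop : List.drop 23 t = t4 := by
                have h24 : List.drop 24 (c :: t) = t4 := by
                  rw [← ht4]; exact List.drop_left' (by decide)
                simpa using h24
              have hscan : pvScan (fuel + 1) (c :: t) = pvV ++ pvScan fuel (List.drop 23 t) := by
                rw [pvScan, if_neg (by simp [hpf1]), if_neg (by simp [hpf2]),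
                    if_neg (by simp [hpf3]), if_pos hpf4]
              rw [hseq, hscan, hdrop, ih t4 hlen hbad4]
            · -- no key matches at this position: both sides copy c
              have hlen : t.length ≤ fuel := by
                simp only [List.length_cons] at hl; omega
              have hsuf : t <:+: (c :: t) := (List.suffix_cons c t).isInfix
              have hbadt : ¬ pvBad t := fun hb => hbad (pvBad_of_infix hsuf hb)
              have e1 := pvRep_nomatch pvK1 pvV1 c t h1
              have hn2 : ¬ pvK2 <+: c :: pvRep pvK1 pvV1 t :=
                fun hp => h2 (pvCons_back pvK1 pvV1 pvK2 (by decide) c t hp)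
              have e2 := pvRep_nomatch pvK2 pvV c (pvRep pvK1 pvV1 t) hn2
              have hn3 : ¬ pvK3 <+: c :: pvRep pvK2 pvV (pvRep pvK1 pvV1 t) :=
                fun hp => h3 (pvCons_back pvK1 pvV1 pvK3 (by decide) c t
                  (pvCons_back pvK2 pvV pvK3 (by decide) c _ hp))
              have e3 := pvRep_nomatch pvK3 pvV c (pvRep pvK2 pvV (pvRep pvK1 pvV1 t)) hn3
              have hn4 : ¬ pvK4 <+: c :: pvRep pvK3 pvV (pvRep pvK2 pvV (pvRep pvK1 pvV1 t)) :=
                fun hp => h4 (pvCons_back pvK1 pvV1 pvK4 (by decide) c t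
                  (pvCons_back pvK2 pvV pvK4 (by decide) c _
                    (pvCons_back pvK3 pvV pvK4 (by decide) c _ hp)))
              have e4 := pvRep_nomatch pvK4 pvV c
                (pvRep pvK3 pvV (pvRep pvK2 pvV (pvRep pvK1 pvV1 t))) hn4
              have hseq : pvSeq (c :: t) = c :: pvSeq t := by
                unfold pvSeq
                rw [e1, e2, e3, e4]
              have hpf1 : pvK1.isPrefixOf (c :: t) = false := by
                rw [Bool.eq_false_iff]
                exact fun hp => h1 (List.isPrefixOf_iff_prefix.mp hp)
              have hpf2 : pvK2.isPrefixOf (c :: t) = false := by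
                rw [Bool.eq_false_iff]
                exact fun hp => h2 (List.isPrefixOf_iff_prefix.mp hp)
              have hpf3 : pvK3.isPrefixOf (c :: t) = false := by
                rw [Bool.eq_false_iff]
                exact fun hp => h3 (List.isPrefixOf_iff_prefix.mp hp)
              have hpf4 : pvK4.isPrefixOf (c :: t) = false := by
                rw [Bool.eq_false_iff]
                exact fun hp => h4 (List.isPrefixOf_iff_prefix.mp hp)
              have hscan : pvScan (fuel + 1) (c :: t) = c :: pvScan fuel t := by
                rw [pvScan, if_neg (by simp [hpf1]), if_neg (by simp [hpf2]),
                    if_neg (by simp [hpf3]), if_neg (by simp [hpf4])]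
              rw [hseq, hscan, ih t hlen hbadt]

-- ---- tightness: inside D_ the two programs differ (proved via a strict length gap) ----

theorem pvScan_nil (f : Nat) : pvScan f [] = [] := by cases f <;> rfl

theorem pvScan_fuel : ∀ (f1 : Nat) (l : List Char) (f2 : Nat), l.length ≤ f1 → l.length ≤ f2 →
    pvScan f1 l = pvScan f2 l := by
  intro f1
  induction f1 with
  | zero =>
    intro l f2 h1 _
    have : l = [] := List.length_eq_zero_iff.mp (Nat.le_zero.mp h1)
    subst this
    rw [pvScan_nil, pvScan_nil]
  | succ g1 ihf =>
    intro l f2 h1 h2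
    cases l with
    | nil => rw [pvScan_nil, pvScan_nil]
    | cons c t =>
      cases f2 with
      | zero => simp at h2
      | succ g2 =>
        simp only [List.length_cons] at h1 h2
        simp only [pvScan]
        split_ifs
        · exact congrArg _ (ihf _ _ (by simp; omega) (by simp; omega))
        · exact congrArg _ (ihf _ _ (by simp; omega) (by simp; omega))
        · exact congrArg _ (ihf _ _ (by simp; omega) (by simp; omega))
        · exact congrArg _ (ihf _ _ (by simp; omega) (by simp; omega))
        · exact congrArg _ (ihf _ _ (by omega) (by omega))

theorem pvScan_thru : ∀ (a : List Char), (∀ j, j < a.length →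
    (¬ (List.drop j a <+: pvK1) ∧ ¬ (pvK1 <+: List.drop j a)) ∧
    (¬ (List.drop j a <+: pvK2) ∧ ¬ (pvK2 <+: List.drop j a)) ∧
    (¬ (List.drop j a <+: pvK3) ∧ ¬ (pvK3 <+: List.drop j a)) ∧
    (¬ (List.drop j a <+: pvK4) ∧ ¬ (pvK4 <+: List.drop j a))) →
    ∀ (fuel : Nat) (z : List Char), a.length + z.length ≤ fuel →
    pvScan fuel (a ++ z) = a ++ pvScan (fuel - a.length) z := by
  intro a
  induction a with
  | nil => intro _ fuel z _; simp
  | cons c a' iha =>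
    intro h fuel z hf
    simp only [List.length_cons] at hf
    cases fuel with
    | zero => omega
    | succ g =>
      have h0 := h 0 (by simp)
      simp only [List.drop_zero] at h0
      have hpf : ∀ K : List Char, ¬ ((c :: a') <+: K) → ¬ (K <+: (c :: a')) →
          K.isPrefixOf (c :: (a' ++ z)) = false := by
        intro K hk1 hk2
        rw [Bool.eq_false_iff]
        intro hp
        have hp' := List.isPrefixOf_iff_prefix.mp hp
        rcases prefix_append_cases (by simpa using hp' : K <+: (c :: a') ++ z) with hc | hc
        · exact hk2 hc
        · exact hk1 hc
      rw [List.cons_append, pvScan,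
          if_neg (by simp [hpf pvK1 h0.1.1 h0.1.2]),
          if_neg (by simp [hpf pvK2 h0.2.1.1 h0.2.1.2]),
          if_neg (by simp [hpf pvK3 h0.2.2.1.1 h0.2.2.1.2]),
          if_neg (by simp [hpf pvK4 h0.2.2.2.1 h0.2.2.2.2]),
          iha (fun j hj => by simpa using h (j + 1) (by simpa using hj)) g z (by omega)]
      simp [Nat.succ_sub_succ]

-- an occurrence of b in K ++ t is a prefix or lies in t, when b cannot straddle K
theorem prefix_of_infix_split (b K t : List Char) (h0 : b <:+: K ++ t)
    (hc : ∀ p, 1 ≤ p → p < K.length → ¬ (List.drop p K <+: b) ∧ ¬ (b <+: List.drop p K)) :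
    b <+: K ++ t ∨ b <:+: t := by
  obtain ⟨s, u, hsu⟩ := h0
  have hp : b <+: List.drop s.length (K ++ t) := by
    rw [← hsu, List.append_assoc, List.drop_left]
    exact List.prefix_append b u
  rcases Nat.lt_or_ge s.length K.length with hlt | hge
  · rcases Nat.eq_zero_or_pos s.length with h0' | h1'
    · rw [h0'] at hp
      exact Or.inl (by simpa using hp)
    · rw [List.drop_append_of_le_length (le_of_lt hlt)] at hp
      rcases prefix_append_cases hp with hc1 | hc1
      · exact absurd hc1 (hc _ h1' hlt).2
      · exact absurd hc1 (hc _ h1' hlt).1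
  · right
    have : List.drop s.length (K ++ t) = List.drop (s.length - K.length) t := by
      rw [List.drop_append]
      rw [List.drop_eq_nil_of_le hge, List.nil_append]
    rw [this] at hp
    exact hp.isInfix.trans (List.drop_suffix _ t).isInfix

theorem infix_cons_cases {b : List Char} {c : Char} {t : List Char}
    (h : b <:+: c :: t) : b <+: c :: t ∨ b <:+: t := by
  obtain ⟨s, u, hsu⟩ := h
  cases s with
  | nil => exact Or.inl ⟨u, by simpa using hsu⟩
  | cons d s' =>
    have := hsu
    rw [List.cons_append, List.cons_append] at this
    exact Or.inr ⟨s', u, (List.cons.injEq _ _ _ _).mp this |>.2⟩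

theorem pvBad_nil : ¬ pvBad [] := by
  intro hb
  rcases hb with h | h | h <;> · rw [List.infix_nil] at h; simp [pvK2, pvK3] at h

set_option maxHeartbeats 1600000 in
theorem pvLT : ∀ (fuel : Nat) (l : List Char), l.length ≤ fuel → pvBad l →
    (pvSeq l).length < (pvScan fuel l).length := by
  intro fuel
  induction fuel with
  | zero =>
    intro l hl hb
    have : l = [] := List.length_eq_zero_iff.mp (Nat.le_zero.mp hl)
    subst this
    exact absurd hb pvBad_nil
  | succ fuel ih =>
    have hle : ∀ (z : List Char), z.length ≤ fuel → (pvSeq z).length ≤ (pvScan fuel z).length := by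
      intro z hz
      by_cases hbz : pvBad z
      · exact le_of_lt (ih z hz hbz)
      · rw [pvMain fuel z hz hbz]
    intro l hl hb
    cases l with
    | nil => exact absurd hb pvBad_nil
    | cons c t =>
      by_cases h1 : pvK1 <+: (c :: t)
      · obtain ⟨t1, ht1⟩ := h1
        have hlen : t1.length ≤ fuel := by
          have := congrArg List.length ht1
          simp only [List.length_append, List.length_cons] at this hl
          have h25 : pvK1.length = 25 := by decide
          omega
        have hbad1 : pvBad t1 := by
          rcases hb with h | h | h
          · rcases prefix_of_infix_split (pvK2 ++ "beta1".toList) pvK1 t1 (by rw [← ht1] at h; exact h) (by decide) with hpre | hin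
            · rcases List.prefix_or_prefix_of_prefix hpre (List.prefix_append pvK1 t1) with hx | hx
              · exact absurd hx (by decide)
              · exact absurd hx (by decide)
            · exact Or.inl hin
          · rcases prefix_of_infix_split (pvK2 ++ "beta2".toList) pvK1 t1 (by rw [← ht1] at h; exact h) (by decide) with hpre | hin
            · rcases List.prefix_or_prefix_of_prefix hpre (List.prefix_append pvK1 t1) with hx | hx
              · exact absurd hx (by decide)
              · exact absurd hx (by decide)
            · exact Or.inr (Or.inl hin)
          · rcases prefix_of_infix_split (pvK3 ++ "beta2".toList) pvK1 t1 (by rw [← ht1] at h; exact h) (by decide) with hpre | hin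
            · rcases List.prefix_or_prefix_of_prefix hpre (List.prefix_append pvK1 t1) with hx | hx
              · exact absurd hx (by decide)
              · exact absurd hx (by decide)
            · exact Or.inr (Or.inr hin)
        have hseq : pvSeq (c :: t) = pvV1 ++ pvSeq t1 := by
          rw [← ht1]
          unfold pvSeq
          rw [pvRep_head pvK1 pvV1 t1 (by decide),
              pvRep_thru_incompat pvK2 pvV pvV1 (by decide),
              pvRep_thru_incompat pvK3 pvV pvV1 (by decide),
              pvRep_thru_incompat pvK4 pvV pvV1 (by decide)]
        have hpf : pvK1.isPrefixOf (c :: t) = true :=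
          List.isPrefixOf_iff_prefix.mpr ⟨t1, ht1⟩
        have hdrop : List.drop 24 t = t1 := by
          have h25 : List.drop 25 (c :: t) = t1 := by
            rw [← ht1]; exact List.drop_left' (by decide)
          simpa using h25
        have hscan : pvScan (fuel + 1) (c :: t) = pvV1 ++ pvScan fuel (List.drop 24 t) := by
          rw [pvScan, if_pos hpf]
        rw [hseq, hscan, hdrop]
        simp only [List.length_append]
        exact Nat.add_lt_add_left (ih t1 hlen hbad1) _
      · by_cases h2 : pvK2 <+: (c :: t)
        · obtain ⟨t2, ht2⟩ := h2
          have hlen : t2.length ≤ fuel := by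
            have := congrArg List.length ht2
            simp only [List.length_append, List.length_cons] at this hl
            have h30 : pvK2.length = 30 := by decide
            omega
          have hlent2 : t2.length + 30 = (c :: t).length := by
            have := congrArg List.length ht2
            simp only [List.length_append] at this
            have h30 : pvK2.length = 30 := by decide
            omega
          have hpf1 : pvK1.isPrefixOf (c :: t) = false := by
            rw [Bool.eq_false_iff]
            exact fun hp => h1 (List.isPrefixOf_iff_prefix.mp hp)
          have hpf2 : pvK2.isPrefixOf (c :: t) = true :=
            List.isPrefixOf_iff_prefix.mpr ⟨t2, ht2⟩
          have hdrop : List.drop 29 t = t2 := by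
            have h30 : List.drop 30 (c :: t) = t2 := by
              rw [← ht2]; exact List.drop_left' (by decide)
            simpa using h30
          have hscan : pvScan (fuel + 1) (c :: t) = pvV ++ pvScan fuel (List.drop 29 t) := by
            rw [pvScan, if_neg (by simp [hpf1]), if_pos hpf2]
          by_cases hb1t : "beta1".toList <+: t2
          · -- the K2-cascade with "beta1": A collapses strictly
            obtain ⟨t', ht'⟩ := hb1t
            have hlent' : t'.length + 5 = t2.length := by
              have := congrArg List.length ht'
              simpa using this
            have e1 : pvRep pvK1 pvV1 t2 = "beta1".toList ++ pvRep pvK1 pvV1 t' := by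
              rw [← ht']; exact pvRep_thru_incompat pvK1 pvV1 _ (by decide) t'
            have e2 : pvRep pvK2 pvV (pvRep pvK1 pvV1 t2) =
                "beta1".toList ++ pvRep pvK2 pvV (pvRep pvK1 pvV1 t') := by
              rw [e1]; exact pvRep_thru_incompat pvK2 pvV _ (by decide) _
            have hscan2 : pvScan fuel t2 = "beta1".toList ++ pvScan (fuel - 5) t' := by
              rw [← ht']
              have h5 : ("beta1".toList).length = 5 := by decide
              have := pvScan_thru "beta1".toList (by decide) fuel t' (by omega)
              rw [this, h5]
            by_cases hb2t' : "beta2".toList <+: t'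
            · -- double cascade with "beta2"
              obtain ⟨t'', ht''⟩ := hb2t'
              have hlent'' : t''.length + 5 = t'.length := by
                have := congrArg List.length ht''
                simpa using this
              have f1 : pvRep pvK1 pvV1 t' = "beta2".toList ++ pvRep pvK1 pvV1 t'' := by
                rw [← ht'']; exact pvRep_thru_incompat pvK1 pvV1 _ (by decide) t''
              have f2 : pvRep pvK2 pvV (pvRep pvK1 pvV1 t') =
                  "beta2".toList ++ pvRep pvK2 pvV (pvRep pvK1 pvV1 t'') := by
                rw [f1]; exact pvRep_thru_incompat pvK2 pvV _ (by decide) _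
              have hseq : pvSeq (c :: t) = pvV ++ pvSeq t'' := by
                rw [← ht2]
                unfold pvSeq
                rw [pvRep_thru_incompat pvK1 pvV1 pvK2 (by decide),
                    pvRep_head pvK2 pvV _ (by decide), e2, f2,
                    ← List.append_assoc, show pvV ++ "beta1".toList = pvK3 from by decide,
                    pvRep_head pvK3 pvV _ (by decide),
                    pvRep_thru_incompat pvK3 pvV "beta2".toList (by decide),
                    ← List.append_assoc, show pvV ++ "beta2".toList = pvK4 from by decide,
                    pvRep_head pvK4 pvV _ (by decide)]
              have hscan3 : pvScan (fuel - 5) t' = "beta2".toList ++ pvScan (fuel - 10) t'' := by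
                rw [← ht'']
                have h5 : ("beta2".toList).length = 5 := by decide
                have := pvScan_thru "beta2".toList (by decide) (fuel - 5) t'' (by omega)
                rw [this, h5, show fuel - 5 - 5 = fuel - 10 from by omega]
              have hfin : (pvSeq t'').length ≤ (pvScan (fuel - 10) t'').length := by
                rw [pvScan_fuel (fuel - 10) t'' fuel (by omega) (by omega)]
                exact hle t'' (by omega)
              rw [hseq, hscan, hdrop, hscan2, hscan3]
              simp only [List.length_append]
              have hv : pvV.length = 19 := by decide
              have h5 : ("beta1".toList).length = 5 := by decide
              have h5' : ("beta2".toList).length = 5 := by decide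
              omega
            · -- single cascade
              have hb2y : ¬ ("beta2".toList <+:
                  pvRep pvK3 pvV (pvRep pvK2 pvV (pvRep pvK1 pvV1 t'))) := by
                intro hp
                have h4 := pvRep_back pvK3 pvV "beta2".toList 0 (by decide)
                  (pvRep pvK2 pvV (pvRep pvK1 pvV1 t')) 0 (Nat.zero_le _) (by simpa using hp)
                have h5 := pvRep_back pvK2 pvV "beta2".toList 0 (by decide)
                  (pvRep pvK1 pvV1 t') 0 (Nat.zero_le _) (by simpa using h4)
                have h6 := pvRep_back pvK1 pvV1 "beta2".toList 0 (by decide)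
                  t' 0 (Nat.zero_le _) (by simpa using h5)
                exact hb2t' (by simpa using h6)
              have hseq : pvSeq (c :: t) = pvV ++ pvSeq t' := by
                rw [← ht2]
                unfold pvSeq
                rw [pvRep_thru_incompat pvK1 pvV1 pvK2 (by decide),
                    pvRep_head pvK2 pvV _ (by decide), e2,
                    ← List.append_assoc, show pvV ++ "beta1".toList = pvK3 from by decide,
                    pvRep_head pvK3 pvV _ (by decide),
                    pvRep_thru_boundary pvK4 pvV pvV (by decide) (by decide) _
                      (by rw [show List.drop pvV.length pvK4 = "beta2".toList from by decide]
                          exact hb2y)]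
              have hfin : (pvSeq t').length ≤ (pvScan (fuel - 5) t').length := by
                rw [pvScan_fuel (fuel - 5) t' fuel (by omega) (by omega)]
                exact hle t' (by omega)
              rw [hseq, hscan, hdrop, hscan2]
              simp only [List.length_append]
              have h5 : ("beta1".toList).length = 5 := by decide
              omega
          · by_cases hb2t : "beta2".toList <+: t2
            · -- the K2-cascade with "beta2"
              obtain ⟨t'', ht''⟩ := hb2t
              have hlent'' : t''.length + 5 = t2.length := by
                have := congrArg List.length ht''
                simpa using this
              have e1 : pvRep pvK1 pvV1 t2 = "beta2".toList ++ pvRep pvK1 pvV1 t'' := by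
                rw [← ht'']; exact pvRep_thru_incompat pvK1 pvV1 _ (by decide) t''
              have e2 : pvRep pvK2 pvV (pvRep pvK1 pvV1 t2) =
                  "beta2".toList ++ pvRep pvK2 pvV (pvRep pvK1 pvV1 t'') := by
                rw [e1]; exact pvRep_thru_incompat pvK2 pvV _ (by decide) _
              have hb1x : ¬ ("beta1".toList <+: pvRep pvK2 pvV (pvRep pvK1 pvV1 t2)) := by
                intro hp
                have h5 := pvRep_back pvK2 pvV "beta1".toList 0 (by decide)
                  (pvRep pvK1 pvV1 t2) 0 (Nat.zero_le _) (by simpa using hp)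
                have h6 := pvRep_back pvK1 pvV1 "beta1".toList 0 (by decide)
                  t2 0 (Nat.zero_le _) (by simpa using h5)
                exact hb1t (by simpa using h6)
              have hseq : pvSeq (c :: t) = pvV ++ pvSeq t'' := by
                rw [← ht2]
                unfold pvSeq
                rw [pvRep_thru_incompat pvK1 pvV1 pvK2 (by decide),
                    pvRep_head pvK2 pvV _ (by decide),
                    pvRep_thru_boundary pvK3 pvV pvV (by decide) (by decide) _
                      (by rw [show List.drop pvV.length pvK3 = "beta1".toList from by decide]
                          exact hb1x), e2,
                    pvRep_thru_incompat pvK3 pvV "beta2".toList (by decide),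
                    ← List.append_assoc, show pvV ++ "beta2".toList = pvK4 from by decide,
                    pvRep_head pvK4 pvV _ (by decide)]
              have hscan2 : pvScan fuel t2 = "beta2".toList ++ pvScan (fuel - 5) t'' := by
                rw [← ht'']
                have h5 : ("beta2".toList).length = 5 := by decide
                have := pvScan_thru "beta2".toList (by decide) fuel t'' (by omega)
                rw [this, h5]
              have hfin : (pvSeq t'').length ≤ (pvScan (fuel - 5) t'').length := by
                rw [pvScan_fuel (fuel - 5) t'' fuel (by omega) (by omega)]
                exact hle t'' (by omega)
              rw [hseq, hscan, hdrop, hscan2]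
              simp only [List.length_append]
              have h5 : ("beta2".toList).length = 5 := by decide
              omega
            · -- no cascade at this occurrence of K2: the bad block lies inside t2
              have hbad2 : pvBad t2 := by
                rcases hb with h | h | h
                · rcases prefix_of_infix_split (pvK2 ++ "beta1".toList) pvK2 t2 (by rw [← ht2] at h; exact h) (by decide) with hpre | hin
                  · exact absurd ((List.prefix_append_right_inj pvK2).mp hpre) hb1t
                  · exact Or.inl hin
                · rcases prefix_of_infix_split (pvK2 ++ "beta2".toList) pvK2 t2 (by rw [← ht2] at h; exact h) (by decide) with hpre | hin
                  · exact absurd ((List.prefix_append_right_inj pvK2).mp hpre) hb2t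
                  · exact Or.inr (Or.inl hin)
                · rcases prefix_of_infix_split (pvK3 ++ "beta2".toList) pvK2 t2 (by rw [← ht2] at h; exact h) (by decide) with hpre | hin
                  · rcases List.prefix_or_prefix_of_prefix hpre (List.prefix_append pvK2 t2) with hx | hx
                    · exact absurd hx (by decide)
                    · exact absurd hx (by decide)
                  · exact Or.inr (Or.inr hin)
              have hb1x : ¬ ("beta1".toList <+: pvRep pvK2 pvV (pvRep pvK1 pvV1 t2)) := by
                intro hp
                have h5 := pvRep_back pvK2 pvV "beta1".toList 0 (by decide)
                  (pvRep pvK1 pvV1 t2) 0 (Nat.zero_le _) (by simpa using hp)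
                have h6 := pvRep_back pvK1 pvV1 "beta1".toList 0 (by decide)
                  t2 0 (Nat.zero_le _) (by simpa using h5)
                exact hb1t (by simpa using h6)
              have hb2x : ¬ ("beta2".toList <+:
                  pvRep pvK3 pvV (pvRep pvK2 pvV (pvRep pvK1 pvV1 t2))) := by
                intro hp
                have h4 := pvRep_back pvK3 pvV "beta2".toList 0 (by decide)
                  (pvRep pvK2 pvV (pvRep pvK1 pvV1 t2)) 0 (Nat.zero_le _) (by simpa using hp)
                have h5 := pvRep_back pvK2 pvV "beta2".toList 0 (by decide)
                  (pvRep pvK1 pvV1 t2) 0 (Nat.zero_le _) (by simpa using h4)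
                have h6 := pvRep_back pvK1 pvV1 "beta2".toList 0 (by decide)
                  t2 0 (Nat.zero_le _) (by simpa using h5)
                exact hb2t (by simpa using h6)
              have hseq : pvSeq (c :: t) = pvV ++ pvSeq t2 := by
                rw [← ht2]
                unfold pvSeq
                rw [pvRep_thru_incompat pvK1 pvV1 pvK2 (by decide),
                    pvRep_head pvK2 pvV _ (by decide),
                    pvRep_thru_boundary pvK3 pvV pvV (by decide) (by decide) _
                      (by rw [show List.drop pvV.length pvK3 = "beta1".toList from by decide]
                          exact hb1x),
                    pvRep_thru_boundary pvK4 pvV pvV (by decide) (by decide) _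
                      (by rw [show List.drop pvV.length pvK4 = "beta2".toList from by decide]
                          exact hb2x)]
              rw [hseq, hscan, hdrop]
              simp only [List.length_append]
              exact Nat.add_lt_add_left (ih t2 hlen hbad2) _
        · by_cases h3 : pvK3 <+: (c :: t)
          · obtain ⟨t3, ht3⟩ := h3
            have hlen : t3.length ≤ fuel := by
              have := congrArg List.length ht3
              simp only [List.length_append, List.length_cons] at this hl
              have h24 : pvK3.length = 24 := by decide
              omega
            have hlent3 : t3.length + 24 = (c :: t).length := by
              have := congrArg List.length ht3
              simp only [List.length_append] at this
              have h24 : pvK3.length = 24 := by decide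
              omega
            have hpf1 : pvK1.isPrefixOf (c :: t) = false := by
              rw [Bool.eq_false_iff]
              exact fun hp => h1 (List.isPrefixOf_iff_prefix.mp hp)
            have hpf2 : pvK2.isPrefixOf (c :: t) = false := by
              rw [Bool.eq_false_iff]
              exact fun hp => h2 (List.isPrefixOf_iff_prefix.mp hp)
            have hpf3 : pvK3.isPrefixOf (c :: t) = true :=
              List.isPrefixOf_iff_prefix.mpr ⟨t3, ht3⟩
            have hdrop : List.drop 23 t = t3 := by
              have h24 : List.drop 24 (c :: t) = t3 := by
                rw [← ht3]; exact List.drop_left' (by decide)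
              simpa using h24
            have hscan : pvScan (fuel + 1) (c :: t) = pvV ++ pvScan fuel (List.drop 23 t) := by
              rw [pvScan, if_neg (by simp [hpf1]), if_neg (by simp [hpf2]), if_pos hpf3]
            by_cases hb2t : "beta2".toList <+: t3
            · -- the K3-cascade with "beta2"
              obtain ⟨t'', ht''⟩ := hb2t
              have hlent'' : t''.length + 5 = t3.length := by
                have := congrArg List.length ht''
                simpa using this
              have e1 : pvRep pvK1 pvV1 t3 = "beta2".toList ++ pvRep pvK1 pvV1 t'' := by
                rw [← ht'']; exact pvRep_thru_incompat pvK1 pvV1 _ (by decide) t''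
              have e2 : pvRep pvK2 pvV (pvRep pvK1 pvV1 t3) =
                  "beta2".toList ++ pvRep pvK2 pvV (pvRep pvK1 pvV1 t'') := by
                rw [e1]; exact pvRep_thru_incompat pvK2 pvV _ (by decide) _
              have hseq : pvSeq (c :: t) = pvV ++ pvSeq t'' := by
                rw [← ht3]
                unfold pvSeq
                rw [pvRep_thru_incompat pvK1 pvV1 pvK3 (by decide),
                    pvRep_thru_incompat pvK2 pvV pvK3 (by decide),
                    pvRep_head pvK3 pvV _ (by decide), e2,
                    pvRep_thru_incompat pvK3 pvV "beta2".toList (by decide),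
                    ← List.append_assoc, show pvV ++ "beta2".toList = pvK4 from by decide,
                    pvRep_head pvK4 pvV _ (by decide)]
              have hscan2 : pvScan fuel t3 = "beta2".toList ++ pvScan (fuel - 5) t'' := by
                rw [← ht'']
                have h5 : ("beta2".toList).length = 5 := by decide
                have := pvScan_thru "beta2".toList (by decide) fuel t'' (by omega)
                rw [this, h5]
              have hfin : (pvSeq t'').length ≤ (pvScan (fuel - 5) t'').length := by
                rw [pvScan_fuel (fuel - 5) t'' fuel (by omega) (by omega)]
                exact hle t'' (by omega)
              rw [hseq, hscan, hdrop, hscan2]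
              simp only [List.length_append]
              have h5 : ("beta2".toList).length = 5 := by decide
              omega
            · -- bad block lies inside t3
              have hbad3 : pvBad t3 := by
                rcases hb with h | h | h
                · rcases prefix_of_infix_split (pvK2 ++ "beta1".toList) pvK3 t3 (by rw [← ht3] at h; exact h) (by decide) with hpre | hin
                  · rcases List.prefix_or_prefix_of_prefix hpre (List.prefix_append pvK3 t3) with hx | hx
                    · exact absurd hx (by decide)
                    · exact absurd hx (by decide)
                  · exact Or.inl hin
                · rcases prefix_of_infix_split (pvK2 ++ "beta2".toList) pvK3 t3 (by rw [← ht3] at h; exact h) (by decide) with hpre | hin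
                  · rcases List.prefix_or_prefix_of_prefix hpre (List.prefix_append pvK3 t3) with hx | hx
                    · exact absurd hx (by decide)
                    · exact absurd hx (by decide)
                  · exact Or.inr (Or.inl hin)
                · rcases prefix_of_infix_split (pvK3 ++ "beta2".toList) pvK3 t3 (by rw [← ht3] at h; exact h) (by decide) with hpre | hin
                  · exact absurd ((List.prefix_append_right_inj pvK3).mp hpre) hb2t
                  · exact Or.inr (Or.inr hin)
              have hb2x : ¬ ("beta2".toList <+:
                  pvRep pvK3 pvV (pvRep pvK2 pvV (pvRep pvK1 pvV1 t3))) := by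
                intro hp
                have h4 := pvRep_back pvK3 pvV "beta2".toList 0 (by decide)
                  (pvRep pvK2 pvV (pvRep pvK1 pvV1 t3)) 0 (Nat.zero_le _) (by simpa using hp)
                have h5 := pvRep_back pvK2 pvV "beta2".toList 0 (by decide)
                  (pvRep pvK1 pvV1 t3) 0 (Nat.zero_le _) (by simpa using h4)
                have h6 := pvRep_back pvK1 pvV1 "beta2".toList 0 (by decide)
                  t3 0 (Nat.zero_le _) (by simpa using h5)
                exact hb2t (by simpa using h6)
              have hseq : pvSeq (c :: t) = pvV ++ pvSeq t3 := by
                rw [← ht3]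
                unfold pvSeq
                rw [pvRep_thru_incompat pvK1 pvV1 pvK3 (by decide),
                    pvRep_thru_incompat pvK2 pvV pvK3 (by decide),
                    pvRep_head pvK3 pvV _ (by decide),
                    pvRep_thru_boundary pvK4 pvV pvV (by decide) (by decide) _
                      (by rw [show List.drop pvV.length pvK4 = "beta2".toList from by decide]
                          exact hb2x)]
              rw [hseq, hscan, hdrop]
              simp only [List.length_append]
              exact Nat.add_lt_add_left (ih t3 hlen hbad3) _
          · by_cases h4 : pvK4 <+: (c :: t)
            · obtain ⟨t4, ht4⟩ := h4
              have hlen : t4.length ≤ fuel := by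
                have := congrArg List.length ht4
                simp only [List.length_append, List.length_cons] at this hl
                have h24 : pvK4.length = 24 := by decide
                omega
              have hbad4 : pvBad t4 := by
                rcases hb with h | h | h
                · rcases prefix_of_infix_split (pvK2 ++ "beta1".toList) pvK4 t4 (by rw [← ht4] at h; exact h) (by decide) with hpre | hin
                  · rcases List.prefix_or_prefix_of_prefix hpre (List.prefix_append pvK4 t4) with hx | hx
                    · exact absurd hx (by decide)
                    · exact absurd hx (by decide)
                  · exact Or.inl hin
                · rcases prefix_of_infix_split (pvK2 ++ "beta2".toList) pvK4 t4 (by rw [← ht4] at h; exact h) (by decide) with hpre | hin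
                  · rcases List.prefix_or_prefix_of_prefix hpre (List.prefix_append pvK4 t4) with hx | hx
                    · exact absurd hx (by decide)
                    · exact absurd hx (by decide)
                  · exact Or.inr (Or.inl hin)
                · rcases prefix_of_infix_split (pvK3 ++ "beta2".toList) pvK4 t4 (by rw [← ht4] at h; exact h) (by decide) with hpre | hin
                  · rcases List.prefix_or_prefix_of_prefix hpre (List.prefix_append pvK4 t4) with hx | hx
                    · exact absurd hx (by decide)
                    · exact absurd hx (by decide)
                  · exact Or.inr (Or.inr hin)
              have hseq : pvSeq (c :: t) = pvV ++ pvSeq t4 := by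
                rw [← ht4]
                unfold pvSeq
                rw [pvRep_thru_incompat pvK1 pvV1 pvK4 (by decide),
                    pvRep_thru_incompat pvK2 pvV pvK4 (by decide),
                    pvRep_thru_incompat pvK3 pvV pvK4 (by decide),
                    pvRep_head pvK4 pvV _ (by decide)]
              have hpf1 : pvK1.isPrefixOf (c :: t) = false := by
                rw [Bool.eq_false_iff]
                exact fun hp => h1 (List.isPrefixOf_iff_prefix.mp hp)
              have hpf2 : pvK2.isPrefixOf (c :: t) = false := by
                rw [Bool.eq_false_iff]
                exact fun hp => h2 (List.isPrefixOf_iff_prefix.mp hp)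
              have hpf3 : pvK3.isPrefixOf (c :: t) = false := by
                rw [Bool.eq_false_iff]
                exact fun hp => h3 (List.isPrefixOf_iff_prefix.mp hp)
              have hpf4 : pvK4.isPrefixOf (c :: t) = true :=
                List.isPrefixOf_iff_prefix.mpr ⟨t4, ht4⟩
              have hdrop : List.drop 23 t = t4 := by
                have h24 : List.drop 24 (c :: t) = t4 := by
                  rw [← ht4]; exact List.drop_left' (by decide)
                simpa using h24
              have hscan : pvScan (fuel + 1) (c :: t) = pvV ++ pvScan fuel (List.drop 23 t) := by
                rw [pvScan, if_neg (by simp [hpf1]), if_neg (by simp [hpf2]),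
                    if_neg (by simp [hpf3]), if_pos hpf4]
              rw [hseq, hscan, hdrop]
              simp only [List.length_append]
              exact Nat.add_lt_add_left (ih t4 hlen hbad4) _
            · -- no key at the head: the bad block lies inside t
              have hlen : t.length ≤ fuel := by
                simp only [List.length_cons] at hl; omega
              have hbadt : pvBad t := by
                rcases hb with h | h | h
                · rcases infix_cons_cases h with hpre | hin
                  · exact absurd ((List.prefix_append pvK2 _).trans hpre) h2
                  · exact Or.inl hin
                · rcases infix_cons_cases h with hpre | hin
                  · exact absurd ((List.prefix_append pvK2 _).trans hpre) h2
                  · exact Or.inr (Or.inl hin)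
                · rcases infix_cons_cases h with hpre | hin
                  · exact absurd ((List.prefix_append pvK3 _).trans hpre) h3
                  · exact Or.inr (Or.inr hin)
              have e1 := pvRep_nomatch pvK1 pvV1 c t h1
              have hn2 : ¬ pvK2 <+: c :: pvRep pvK1 pvV1 t :=
                fun hp => h2 (pvCons_back pvK1 pvV1 pvK2 (by decide) c t hp)
              have e2 := pvRep_nomatch pvK2 pvV c (pvRep pvK1 pvV1 t) hn2
              have hn3 : ¬ pvK3 <+: c :: pvRep pvK2 pvV (pvRep pvK1 pvV1 t) :=
                fun hp => h3 (pvCons_back pvK1 pvV1 pvK3 (by decide) c t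
                  (pvCons_back pvK2 pvV pvK3 (by decide) c _ hp))
              have e3 := pvRep_nomatch pvK3 pvV c (pvRep pvK2 pvV (pvRep pvK1 pvV1 t)) hn3
              have hn4 : ¬ pvK4 <+: c :: pvRep pvK3 pvV (pvRep pvK2 pvV (pvRep pvK1 pvV1 t)) :=
                fun hp => h4 (pvCons_back pvK1 pvV1 pvK4 (by decide) c t
                  (pvCons_back pvK2 pvV pvK4 (by decide) c _
                    (pvCons_back pvK3 pvV pvK4 (by decide) c _ hp)))
              have e4 := pvRep_nomatch pvK4 pvV c
                (pvRep pvK3 pvV (pvRep pvK2 pvV (pvRep pvK1 pvV1 t))) hn4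
              have hseq : pvSeq (c :: t) = c :: pvSeq t := by
                unfold pvSeq
                rw [e1, e2, e3, e4]
              have hpf1 : pvK1.isPrefixOf (c :: t) = false := by
                rw [Bool.eq_false_iff]
                exact fun hp => h1 (List.isPrefixOf_iff_prefix.mp hp)
              have hpf2 : pvK2.isPrefixOf (c :: t) = false := by
                rw [Bool.eq_false_iff]
                exact fun hp => h2 (List.isPrefixOf_iff_prefix.mp hp)
              have hpf3 : pvK3.isPrefixOf (c :: t) = false := by
                rw [Bool.eq_false_iff]
                exact fun hp => h3 (List.isPrefixOf_iff_prefix.mp hp)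
              have hpf4 : pvK4.isPrefixOf (c :: t) = false := by
                rw [Bool.eq_false_iff]
                exact fun hp => h4 (List.isPrefixOf_iff_prefix.mp hp)
              have hscan : pvScan (fuel + 1) (c :: t) = c :: pvScan fuel t := by
                rw [pvScan, if_neg (by simp [hpf1]), if_neg (by simp [hpf2]),
                    if_neg (by simp [hpf3]), if_neg (by simp [hpf4])]
              rw [hseq, hscan]
              simpa using ih t hlen hbadt

-- ===== VERDICT (by name: the statement is the Claim_ definition above) =====
theorem upgrade_api_versions_spec : Claim_unchanged_upgrade_api_versions := by
  intro m _ hD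
  have hA : upgrade_api_versions m =
      PySem.Str.replace (PySem.Str.replace (PySem.Str.replace (PySem.Str.replace m
        "apiVersion: batch/v1beta1" "apiVersion: batch/v1")
        "apiVersion: extensions/v1beta1" "apiVersion: apps/v1")
        "apiVersion: apps/v1beta1" "apiVersion: apps/v1")
        "apiVersion: apps/v1beta2" "apiVersion: apps/v1" := rfl
  have hlist : (upgrade_api_versions m).toList = pvSeq m.toList := by
    rw [hA]
    simp only [PySem.Str.toList_replace]
    rw [replace_eq_pvRep _ _ (by decide), replace_eq_pvRep _ _ (by decide),
        replace_eq_pvRep _ _ (by decide), replace_eq_pvRep _ _ (by decide)]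
    rfl
  have hndL : ¬ pvBad m.toList := by
    intro hb
    apply hD
    rcases hb with h | h | h
    · refine Or.inl ?_
      rw [PySem.Str.isIn_eq, PySem.Chars.isIn_iff_infix]
      rw [show "apiVersion: extensions/v1beta1beta1".toList = pvK2 ++ "beta1".toList from by decide]
      exact h
    · refine Or.inr (Or.inl ?_)
      rw [PySem.Str.isIn_eq, PySem.Chars.isIn_iff_infix]
      rw [show "apiVersion: extensions/v1beta1beta2".toList = pvK2 ++ "beta2".toList from by decide]
      exact h
    · refine Or.inr (Or.inr ?_)
      rw [PySem.Str.isIn_eq, PySem.Chars.isIn_iff_infix]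
      rw [show "apiVersion: apps/v1beta1beta2".toList = pvK3 ++ "beta2".toList from by decide]
      exact h
  have hmain := pvMain m.toList.length m.toList (le_refl _) hndL
  show upgrade_api_versions m = upgrade_api_versions_alt m
  unfold upgrade_api_versions_alt
  rw [← hmain, ← hlist]
  exact String.ofList_toList.symm

theorem upgrade_api_versions_changed : Claim_changed_upgrade_api_versions := by
  unfold Claim_changed_upgrade_api_versions; decide

theorem upgrade_api_versions_tight : Claim_exact_upgrade_api_versions := by
  intro m _ hD heq
  have hbad : pvBad m.toList := by
    rcases hD with h | h | h
    · rw [PySem.Str.isIn_eq, PySem.Chars.isIn_iff_infix] at h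
      exact Or.inl (by
        rw [show pvK2 ++ "beta1".toList = "apiVersion: extensions/v1beta1beta1".toList from by decide]
        exact h)
    · rw [PySem.Str.isIn_eq, PySem.Chars.isIn_iff_infix] at h
      exact Or.inr (Or.inl (by
        rw [show pvK2 ++ "beta2".toList = "apiVersion: extensions/v1beta1beta2".toList from by decide]
        exact h))
    · rw [PySem.Str.isIn_eq, PySem.Chars.isIn_iff_infix] at h
      exact Or.inr (Or.inr (by
        rw [show pvK3 ++ "beta2".toList = "apiVersion: apps/v1beta1beta2".toList from by decide]
        exact h))
  have hA : upgrade_api_versions m =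
      PySem.Str.replace (PySem.Str.replace (PySem.Str.replace (PySem.Str.replace m
        "apiVersion: batch/v1beta1" "apiVersion: batch/v1")
        "apiVersion: extensions/v1beta1" "apiVersion: apps/v1")
        "apiVersion: apps/v1beta1" "apiVersion: apps/v1")
        "apiVersion: apps/v1beta2" "apiVersion: apps/v1" := rfl
  have hlist : (upgrade_api_versions m).toList = pvSeq m.toList := by
    rw [hA]
    simp only [PySem.Str.toList_replace]
    rw [replace_eq_pvRep _ _ (by decide), replace_eq_pvRep _ _ (by decide),
        replace_eq_pvRep _ _ (by decide), replace_eq_pvRep _ _ (by decide)]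
    rfl
  have hlist2 : (upgrade_api_versions_alt m).toList = pvScan m.toList.length m.toList := by
    unfold upgrade_api_versions_alt
    rw [String.toList_ofList]
  have hlt := pvLT m.toList.length m.toList (le_refl _) hbad
  rw [← hlist, ← hlist2, heq] at hlt
  exact lt_irrefl _ hlt
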